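-- pv_equiv track=rewrite | github.com/josephharding/render_text | scripts/sky_vectorization.py | split_edge
-- ===== SOURCE A (Python) =====
-- def split_edge(edge, point):
--     past = False
--     front = []
--     back = []
--     for p in edge:
--         if p == point:
--             past = True
--         elif past:
--             back.append(p)
--         else:
--             front.append(p)
--
--     return front, back
-- ===== SOURCE B (Python) =====
-- def split_edge(edge, point):
--     if point in edge:
--         i = edge.index(point)
--         return list(edge[:i]), [x for x in edge[i+1:] if x != point]
--     return list(edge), []
-- ===== Notes on version B (the rewrite author's own statement) =====
-- stated objective: alternative
-- what changed: Replaces A's single accumulating pass with state flag by a find-then-slice decomposition: locate the first occurrence with index, slice the list around it, and filter later occurrences of point out of the back slice.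
import Mathlib
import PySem

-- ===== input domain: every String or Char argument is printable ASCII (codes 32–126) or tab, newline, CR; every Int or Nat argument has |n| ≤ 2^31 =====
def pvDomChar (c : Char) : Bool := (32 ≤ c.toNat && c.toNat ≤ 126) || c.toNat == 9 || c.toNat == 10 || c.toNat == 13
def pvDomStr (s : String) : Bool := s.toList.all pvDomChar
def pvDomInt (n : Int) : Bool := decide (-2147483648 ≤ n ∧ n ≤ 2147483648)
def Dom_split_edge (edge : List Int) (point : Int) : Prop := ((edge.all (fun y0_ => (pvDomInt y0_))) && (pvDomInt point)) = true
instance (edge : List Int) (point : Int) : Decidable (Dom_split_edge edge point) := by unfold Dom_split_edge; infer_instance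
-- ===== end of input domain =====

-- B replaces A's single accumulating pass (past-flag) by a find-then-slice decomposition of the same cost.


-- ===== PORT A =====
-- loop state: (past, front, back)
def split_edge_step (point : Int) (s : Bool × List Int × List Int) (p : Int) : Bool × List Int × List Int :=
  if p == point then (true, s.2.1, s.2.2)
  else if s.1 then (s.1, s.2.1, s.2.2 ++ [p])
  else (s.1, s.2.1 ++ [p], s.2.2)

def split_edge (edge : List Int) (point : Int) : List Int × List Int :=
  let st := edge.foldl (split_edge_step point) (false, [], [])
  (st.2.1, st.2.2)

-- ===== PORT B =====
def split_edge_alt (edge : List Int) (point : Int) : List Int × List Int :=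
  match PySem.List.index? edge point with   -- 'point in edge' guard + edge.index(point)
  | some i => (PySem.List.slice edge none (some (i : Int)),
               (PySem.List.slice edge (some ((i : Int) + 1)) none).filter (fun x => x != point))
  | none => (edge, [])

-- ===== PRECONDITION & SPEC =====
def Spec_split_edge (edge : List Int) (point : Int) (out : List Int × List Int) : Prop := out = split_edge_alt edge point
instance (edge : List Int) (point : Int) (out : List Int × List Int) : Decidable (Spec_split_edge edge point out) := by unfold Spec_split_edge; infer_instance

-- ===== CLAIM (what is proved, stated in full; the proofs are below) =====
def Claim_equal_split_edge : Prop := ∀ (edge : List Int) (point : Int), Dom_split_edge edge point → Spec_split_edge edge point (split_edge edge point)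

-- ===== LEMMAS AND PROOFS =====
-- reference form: front = prefix before first occurrence, back = suffix after it with point filtered out
def seRec (point : Int) : List Int → List Int × List Int
  | [] => ([], [])
  | p :: rest =>
    if p = point then ([], rest.filter (fun x => x != point))
    else ((p :: (seRec point rest).1), (seRec point rest).2)

theorem foldl_past_true (point : Int) (l F B : List Int) :
    l.foldl (split_edge_step point) (true, F, B) = (true, F, B ++ l.filter (fun x => x != point)) := by
  induction l generalizing B with
  | nil => simp
  | cons p rest ih =>
    by_cases h : p = point <;> simp [split_edge_step, h, ih]

theorem foldl_eq_seRec (point : Int) (l F : List Int) :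
    (l.foldl (split_edge_step point) (false, F, [])).2 = (F ++ (seRec point l).1, (seRec point l).2) := by
  induction l generalizing F with
  | nil => simp [seRec]
  | cons p rest ih =>
    by_cases h : p = point
    · simp [split_edge_step, h, seRec, foldl_past_true]
    · have := ih (F ++ [p])
      simp [split_edge_step, h, seRec, this]

theorem alt_eq_seRec (point : Int) (l : List Int) : split_edge_alt l point = seRec point l := by
  induction l with
  | nil => simp [split_edge_alt, seRec, PySem.List.index?_eq_idxOf?]
  | cons p rest ih =>
    by_cases h : p = point
    · subst h
      rw [split_edge_alt, PySem.List.index?_cons_self]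
      simp [seRec, PySem.List.slice_from_one]
      have : PySem.List.slice (p :: rest) none (some ((0 : Nat) : Int)) = (p :: rest).take 0 :=
        PySem.List.slice_to_natCast _ _
      simpa using this
    · rw [split_edge_alt, PySem.List.index?_cons_of_ne rest h]
      rw [split_edge_alt] at ih
      simp only [PySem.List.index?_eq_idxOf?] at ih ⊢
      cases hidx : List.idxOf? point rest with
      | none => simp [hidx] at ih; simp [seRec, h, ← ih]
      | some i =>
        simp only [Option.map_some]
        have h1 : PySem.List.slice (p :: rest) none (some ((i + 1 : Nat) : Int)) = (p :: rest).take (i + 1) :=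
          PySem.List.slice_to_natCast _ _
        have h2 : PySem.List.slice (p :: rest) (some ((i + 1 + 1 : Nat) : Int)) none = (p :: rest).drop (i + 1 + 1) :=
          PySem.List.slice_from_natCast _ _
        have h3 : PySem.List.slice rest none (some ((i : Nat) : Int)) = rest.take i :=
          PySem.List.slice_to_natCast _ _
        have h4 : PySem.List.slice rest (some ((i + 1 : Nat) : Int)) none = rest.drop (i + 1) :=
          PySem.List.slice_from_natCast _ _
        push_cast at h1 h2 h4
        simp [hidx, h3, h4] at ih
        push_cast
        rw [h1, h2]
        simp [seRec, h, ← ih]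

-- ===== VERDICT (by name: the statement is the Claim_ definition above) =====
theorem split_edge_spec : Claim_equal_split_edge := by
  intro edge point _
  unfold Spec_split_edge split_edge
  rw [alt_eq_seRec]
  simpa using foldl_eq_seRec point edge []
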